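-- pv_equiv track=rewrite | github.com/phamvietbang/CreditScore | calculate/services/wallet_score.py | combined_asset_logs
-- ===== SOURCE A (Python) =====
-- def combined_asset_logs(balances, deposits, borrows):
--     timestamps = set(list(balances.keys()) + list(deposits.keys()) + list(borrows.keys()))
--     timestamps = sorted(timestamps)
--     assets = {}
--     balance = deposit = borrow = 0
--     for t in timestamps:
--         balance = balances.get(t) if t in balances else balance
--         deposit = deposits.get(t) if t in deposits else deposit
--         borrow = borrows.get(t) if t in borrows else borrow
--
--         assets[t] = max(balance + deposit - borrow, 0)
--
--     return assets
-- ===== SOURCE B (Python) =====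
-- def combined_asset_logs(balances, deposits, borrows):
--     timestamps = sorted(set(list(balances.keys()) + list(deposits.keys()) + list(borrows.keys())))
--
--     def fill(d):
--         vals, last = [], 0
--         for t in timestamps:
--             if t in d:
--                 last = d[t]
--             vals.append(last)
--         return vals
--
--     return {t: max(b + d - r, 0)
--             for t, b, d, r in zip(timestamps, fill(balances), fill(deposits), fill(borrows))}
-- ===== Notes on version B (the rewrite author's own statement) =====
-- stated objective: simpler
-- what changed: A's single fused loop that carries balance/deposit/borrow and builds the dict in one pass is replaced by a small forward-fill helper applied independently to each of the three dicts, then one zip pass combining the aligned value lists into assets.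
import Mathlib
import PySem

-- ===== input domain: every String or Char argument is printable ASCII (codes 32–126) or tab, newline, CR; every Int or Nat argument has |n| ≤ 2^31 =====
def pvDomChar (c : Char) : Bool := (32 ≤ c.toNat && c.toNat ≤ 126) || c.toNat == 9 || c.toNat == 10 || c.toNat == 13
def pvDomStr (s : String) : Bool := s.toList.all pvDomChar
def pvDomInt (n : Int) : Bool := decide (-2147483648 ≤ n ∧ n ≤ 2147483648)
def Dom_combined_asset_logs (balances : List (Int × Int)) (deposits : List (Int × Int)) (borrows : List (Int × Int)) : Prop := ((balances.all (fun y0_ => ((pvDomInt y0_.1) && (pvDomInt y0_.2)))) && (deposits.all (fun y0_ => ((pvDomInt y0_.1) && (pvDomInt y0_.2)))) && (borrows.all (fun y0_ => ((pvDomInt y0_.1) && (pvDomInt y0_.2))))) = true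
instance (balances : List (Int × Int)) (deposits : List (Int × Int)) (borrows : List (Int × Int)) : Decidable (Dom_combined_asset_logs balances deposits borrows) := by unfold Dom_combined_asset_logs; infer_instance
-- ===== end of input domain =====

-- B replaces A's single fused carry loop by three independent forward-fill passes
-- plus one zip/combine pass (objective: simpler decomposition; same asymptotic cost).

-- ===== PORT A =====
-- the body of A's single for-loop over the sorted timestamps (state: assets dict and the three carried values)
def pvStepA (bd dd rd : PySem.Dict Int Int) (st : PySem.Dict Int Int × Int × Int × Int) (t : Int) : PySem.Dict Int Int × Int × Int × Int :=
  let balance := match bd.get? t with | some v => v | none => st.2.1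
  let deposit := match dd.get? t with | some v => v | none => st.2.2.1
  let borrow := match rd.get? t with | some v => v | none => st.2.2.2
  (st.1.insert t (max (balance + deposit - borrow) 0), balance, deposit, borrow)

def combined_asset_logs (balances : List (Int × Int)) (deposits : List (Int × Int)) (borrows : List (Int × Int)) : List (Int × Int) :=
  let bd : PySem.Dict Int Int := PySem.Dict.mk balances
  let dd : PySem.Dict Int Int := PySem.Dict.mk deposits
  let rd : PySem.Dict Int Int := PySem.Dict.mk borrows
  let timestamps : PySem.Set Int := PySem.Set.ofList (bd.keys ++ dd.keys ++ rd.keys)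
  let ts := PySem.List.sorted timestamps (fun x => x) false
  (ts.foldl (pvStepA bd dd rd) (PySem.Dict.empty, 0, 0, 0)).1.items

-- ===== PORT B =====
-- Source B's fill helper: forward-fill of one dict along the timestamp list, carried value starts at 0
def pvFill (d : PySem.Dict Int Int) (ts : List Int) : List Int :=
  (ts.foldl (fun (st : List Int × Int) t =>
      let last := match d.get? t with | some v => v | none => st.2
      (st.1 ++ [last], last)) ([], 0)).1

def combined_asset_logs_alt (balances : List (Int × Int)) (deposits : List (Int × Int)) (borrows : List (Int × Int)) : List (Int × Int) :=
  let bd : PySem.Dict Int Int := PySem.Dict.mk balances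
  let dd : PySem.Dict Int Int := PySem.Dict.mk deposits
  let rd : PySem.Dict Int Int := PySem.Dict.mk borrows
  let ts := PySem.List.sorted (PySem.Set.ofList (bd.keys ++ dd.keys ++ rd.keys)) (fun x => x) false
  List.zipWith (fun t (bdr : Int × Int × Int) => (t, max (bdr.1 + bdr.2.1 - bdr.2.2) 0))
    ts (List.zip (pvFill bd ts) (List.zip (pvFill dd ts) (pvFill rd ts)))

-- ===== PRECONDITION & SPEC =====
def Spec_combined_asset_logs (balances : List (Int × Int)) (deposits : List (Int × Int)) (borrows : List (Int × Int)) (out : List (Int × Int)) : Prop := out = combined_asset_logs_alt balances deposits borrows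
instance (balances : List (Int × Int)) (deposits : List (Int × Int)) (borrows : List (Int × Int)) (out : List (Int × Int)) : Decidable (Spec_combined_asset_logs balances deposits borrows out) := by unfold Spec_combined_asset_logs; infer_instance

-- ===== CLAIM (what is proved, stated in full; the proofs are below) =====
def Claim_equal_combined_asset_logs : Prop := ∀ (balances : List (Int × Int)) (deposits : List (Int × Int)) (borrows : List (Int × Int)), Dom_combined_asset_logs balances deposits borrows → Spec_combined_asset_logs balances deposits borrows (combined_asset_logs balances deposits borrows)

-- ===== LEMMAS AND PROOFS =====

-- reference list both sides are reduced to: the (timestamp, asset) pairs with carried state b, d, r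
def pvSpecList (bd dd rd : PySem.Dict Int Int) : List Int → Int → Int → Int → List (Int × Int)
  | [], _, _, _ => []
  | t :: ts, b, d, r =>
    let b' := match bd.get? t with | some v => v | none => b
    let d' := match dd.get? t with | some v => v | none => d
    let r' := match rd.get? t with | some v => v | none => r
    (t, max (b' + d' - r') 0) :: pvSpecList bd dd rd ts b' d' r'

-- A's fused loop over fresh distinct keys appends exactly pvSpecList to assets.items
theorem pvFoldA_items (bd dd rd : PySem.Dict Int Int) :
    ∀ (ts : List Int) (assets : PySem.Dict Int Int) (b d r : Int), ts.Nodup →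
      (∀ t ∈ ts, assets.contains t = false) →
      (ts.foldl (pvStepA bd dd rd) (assets, b, d, r)).1.items
        = assets.items ++ pvSpecList bd dd rd ts b d r := by
  intro ts
  induction ts with
  | nil => intro assets b d r _ _; simp [pvSpecList]
  | cons t ts ih =>
    intro assets b d r hnd hfresh
    have hndt : ts.Nodup := (List.nodup_cons.mp hnd).2
    have htnot : t ∉ ts := (List.nodup_cons.mp hnd).1
    simp only [List.foldl_cons]
    rw [show pvStepA bd dd rd (assets, b, d, r) t =
        (assets.insert t (max ((match bd.get? t with | some v => v | none => b)
            + (match dd.get? t with | some v => v | none => d)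
            - (match rd.get? t with | some v => v | none => r)) 0),
          (match bd.get? t with | some v => v | none => b),
          (match dd.get? t with | some v => v | none => d),
          (match rd.get? t with | some v => v | none => r)) from rfl]
    rw [ih _ _ _ _ hndt ?_]
    · rw [PySem.Dict.items_insert_of_not_contains _ _ (hfresh t (by simp))]
      simp [pvSpecList]
    · intro t' ht'
      rw [PySem.Dict.contains_insert]
      have : assets.contains t' = false := hfresh t' (by simp [ht'])
      have hne : t' ≠ t := fun h => htnot (h ▸ ht')
      simp [this, hne]

-- pvFill as structural recursion
def pvFillRec (d : PySem.Dict Int Int) : List Int → Int → List Int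
  | [], _ => []
  | t :: ts, last =>
    let l' := match d.get? t with | some v => v | none => last
    l' :: pvFillRec d ts l'

theorem pvFill_foldl (d : PySem.Dict Int Int) :
    ∀ (ts : List Int) (acc : List Int) (last : Int),
      (ts.foldl (fun (st : List Int × Int) t =>
          let l := match d.get? t with | some v => v | none => st.2
          (st.1 ++ [l], l)) (acc, last)).1 = acc ++ pvFillRec d ts last := by
  intro ts
  induction ts with
  | nil => intro acc last; simp [pvFillRec]
  | cons t ts ih => intro acc last; simp only [List.foldl_cons]; rw [ih]; simp [pvFillRec]

theorem pvFill_eq (d : PySem.Dict Int Int) (ts : List Int) :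
    pvFill d ts = pvFillRec d ts 0 := by
  unfold pvFill; rw [pvFill_foldl]; simp

-- the three fills zipped back together are pvSpecList
theorem pvZip_spec (bd dd rd : PySem.Dict Int Int) :
    ∀ (ts : List Int) (b d r : Int),
      List.zipWith (fun t (bdr : Int × Int × Int) => (t, max (bdr.1 + bdr.2.1 - bdr.2.2) 0))
          ts (List.zip (pvFillRec bd ts b) (List.zip (pvFillRec dd ts d) (pvFillRec rd ts r)))
        = pvSpecList bd dd rd ts b d r := by
  intro ts
  induction ts with
  | nil => intro b d r; simp [pvFillRec, pvSpecList]
  | cons t ts ih =>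
    intro b d r
    simp only [pvFillRec, pvSpecList, List.zip_cons_cons, List.zipWith_cons_cons]
    rw [ih]

-- ===== VERDICT (by name: the statement is the Claim_ definition above) =====
theorem combined_asset_logs_spec : Claim_equal_combined_asset_logs := by
  intro balances deposits borrows _
  unfold Spec_combined_asset_logs combined_asset_logs combined_asset_logs_alt
  simp only []
  set bd : PySem.Dict Int Int := PySem.Dict.mk balances
  set dd : PySem.Dict Int Int := PySem.Dict.mk deposits
  set rd : PySem.Dict Int Int := PySem.Dict.mk borrows
  set ts := PySem.List.sorted (PySem.Set.ofList (bd.keys ++ dd.keys ++ rd.keys)) (fun x => x) false with hts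
  have hnd : ts.Nodup := by
    have hperm := PySem.List.sorted_perm (xs := PySem.Set.ofList (bd.keys ++ dd.keys ++ rd.keys)) (key := fun x => x) (rev := false)
    exact hperm.symm.nodup (PySem.Set.nodup_ofList _)
  rw [pvFoldA_items bd dd rd ts PySem.Dict.empty 0 0 0 hnd (by intro t _; simp [PySem.Dict.contains_empty])]
  rw [pvFill_eq, pvFill_eq, pvFill_eq, pvZip_spec]
  simp [PySem.Dict.empty]
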